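-- pv_equiv track=rewrite | github.com/aryandaa/Study | Cyber Security/CTF/FITCompetition2025/CAESAR/descryp2.py | decrypt_variable_caesar
-- ===== SOURCE A (Python) =====
-- def decrypt_variable_caesar(ciphertext):
--     shifts = [1,2,3,4,5,1,2,3,4,5]  # Daftar pergeseran
--     decrypted = ""
--     idx = 0
--
--     for char in ciphertext:
--         if char.isalpha():
--             shift = shifts[idx % len(shifts)]
--             if char.islower():
--                 decrypted += chr((ord(char) - ord('a') - shift) % 26 + ord('a'))
--             elif char.isupper():
--                 decrypted += chr((ord(char) - ord('A') - shift) % 26 + ord('A'))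
--             idx += 1
--         else:
--             decrypted += char
--     return decrypted
-- ===== SOURCE B (Python) =====
-- def decrypt_variable_caesar(ciphertext):
--     # Pass 1: decrypt only the letters, indexed by their letter position.
--     letters = [c for c in ciphertext if c.isalpha()]
--     dec = []
--     for i, c in enumerate(letters):
--         s = i % 5 + 1
--         if c.islower():
--             dec.append(chr((ord(c) - ord('a') - s) % 26 + ord('a')))
--         else:
--             dec.append(chr((ord(c) - ord('A') - s) % 26 + ord('A')))
--     # Pass 2: reassemble, consuming decrypted letters at alpha positions.
--     it = iter(dec)
--     return ''.join(next(it) if c.isalpha() else c for c in ciphertext)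
-- ===== Notes on version B (the rewrite author's own statement) =====
-- stated objective: alternative
-- what changed: Replaces A's single loop with a running letter-index and 10-entry shift table by two passes: first decrypt the filtered letters via enumerate with shift i % 5 + 1, then rejoin them into the original text with an iterator at alpha positions.
import Mathlib
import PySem

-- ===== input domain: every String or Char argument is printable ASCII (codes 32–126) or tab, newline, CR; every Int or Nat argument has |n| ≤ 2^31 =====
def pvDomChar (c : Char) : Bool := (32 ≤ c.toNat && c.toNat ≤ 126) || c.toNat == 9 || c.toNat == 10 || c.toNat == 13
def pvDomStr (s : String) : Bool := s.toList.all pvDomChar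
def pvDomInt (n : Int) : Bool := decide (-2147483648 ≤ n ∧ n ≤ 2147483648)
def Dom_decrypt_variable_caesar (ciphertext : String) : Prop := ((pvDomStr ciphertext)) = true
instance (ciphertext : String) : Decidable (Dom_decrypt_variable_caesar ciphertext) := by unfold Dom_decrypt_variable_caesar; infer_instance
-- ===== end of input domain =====

-- B replaces A's single running-index loop by two passes (decrypt the filtered letters,
-- then reinsert them at alpha positions); alternative decomposition, same cost.


-- ===== PORT A =====
-- shifts = [1,2,3,4,5,1,2,3,4,5]
def pvShiftsA : List Int := [1, 2, 3, 4, 5, 1, 2, 3, 4, 5]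

-- loop body of A: state = (decrypted so far, idx)
def pvStepA (st : List Char × Int) (c : Char) : List Char × Int :=
  if PySem.Chars.isalpha c then
    let shift := PySem.List.pyGetD pvShiftsA (PySem.Int.mod st.2 (pvShiftsA.length : Int)) 0
    if PySem.Chars.islower c then
      (st.1 ++ [Char.ofNat ((PySem.Int.mod ((c.toNat : Int) - 97 - shift) 26) + 97).toNat], st.2 + 1)
    else if PySem.Chars.isupper c then
      (st.1 ++ [Char.ofNat ((PySem.Int.mod ((c.toNat : Int) - 65 - shift) 26) + 65).toNat], st.2 + 1)
    else (st.1, st.2 + 1)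
  else (st.1 ++ [c], st.2)

def decrypt_variable_caesar (ciphertext : String) : String :=
  String.ofList (ciphertext.toList.foldl pvStepA ([], 0)).1

-- ===== PORT B =====
-- decrypt one letter, letter-index i, shift i % 5 + 1 (letters are alpha; ASCII alpha is lower or upper)
def pvShiftB (i : Int) (c : Char) : Char :=
  let s := PySem.Int.mod i 5 + 1
  if PySem.Chars.islower c then
    Char.ofNat ((PySem.Int.mod ((c.toNat : Int) - 97 - s) 26) + 97).toNat
  else
    Char.ofNat ((PySem.Int.mod ((c.toNat : Int) - 65 - s) 26) + 65).toNat

-- pass 2: walk the original text, consuming decrypted letters at alpha positions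
-- (the [] case is Python's exhausted iterator; it is never reached)
def pvReassemble : List Char → List Char → List Char
  | [], _ => []
  | c :: cs, ds =>
    if PySem.Chars.isalpha c then
      match ds with
      | d :: ds' => d :: pvReassemble cs ds'
      | [] => []
    else c :: pvReassemble cs ds

def decrypt_variable_caesar_alt (ciphertext : String) : String :=
  let letters := ciphertext.toList.filter PySem.Chars.isalpha
  let dec := (PySem.List.enumerate letters 0).map (fun p => pvShiftB p.1 p.2)
  String.ofList (pvReassemble ciphertext.toList dec)

-- ===== PRECONDITION & SPEC =====
def Spec_decrypt_variable_caesar (ciphertext : String) (out : String) : Prop := out = decrypt_variable_caesar_alt ciphertext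
instance (ciphertext : String) (out : String) : Decidable (Spec_decrypt_variable_caesar ciphertext out) := by unfold Spec_decrypt_variable_caesar; infer_instance

-- ===== CLAIM (what is proved, stated in full; the proofs are below) =====
def Claim_equal_decrypt_variable_caesar : Prop := ∀ (ciphertext : String), Dom_decrypt_variable_caesar ciphertext → Spec_decrypt_variable_caesar ciphertext (decrypt_variable_caesar ciphertext)

-- ===== LEMMAS AND PROOFS =====

lemma pvShift_table (idx : Int) (_h : 0 ≤ idx) :
    PySem.List.pyGetD pvShiftsA (PySem.Int.mod idx (pvShiftsA.length : Int)) 0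
      = PySem.Int.mod idx 5 + 1 := by
  have h10 : (pvShiftsA.length : Int) = 10 := by decide
  rw [h10, PySem.Int.mod_eq_emod_of_pos (by norm_num : (0:Int) < 10),
      PySem.Int.mod_eq_emod_of_pos (by norm_num : (0:Int) < 5)]
  have hr : idx % 10 = 0 ∨ idx % 10 = 1 ∨ idx % 10 = 2 ∨ idx % 10 = 3 ∨ idx % 10 = 4 ∨
      idx % 10 = 5 ∨ idx % 10 = 6 ∨ idx % 10 = 7 ∨ idx % 10 = 8 ∨ idx % 10 = 9 := by omega
  rcases hr with h' | h' | h' | h' | h' | h' | h' | h' | h' | h' <;>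
    · rw [h']
      have h5 : idx % 5 = (idx % 10) % 5 := by omega
      rw [h5, h']
      decide

lemma pvMain (cs : List Char) : ∀ (acc : List Char) (idx : Int), 0 ≤ idx →
    (cs.foldl pvStepA (acc, idx)).1
      = acc ++ pvReassemble cs
          ((PySem.List.enumerate (cs.filter PySem.Chars.isalpha) idx).map (fun p => pvShiftB p.1 p.2)) := by
  induction cs with
  | nil => intro acc idx _; simp [pvReassemble]
  | cons c cs ih =>
    intro acc idx hidx
    by_cases ha : PySem.Chars.isalpha c = true
    · have hd : pvStepA (acc, idx) c
          = (acc ++ [pvShiftB idx c], idx + 1) := by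
        unfold pvStepA pvShiftB
        rw [pvShift_table idx hidx]
        have hcase : PySem.Chars.isupper c = true ∨ PySem.Chars.islower c = true := by
          simpa [PySem.Chars.isalpha, Bool.or_eq_true] using ha
        by_cases hl : PySem.Chars.islower c = true
        · simp [ha, hl]
        · have hu : PySem.Chars.isupper c = true := by tauto
          simp [ha, hl, hu]
      rw [List.foldl_cons, hd, ih (acc ++ [pvShiftB idx c]) (idx + 1) (by omega)]
      simp [ha, PySem.List.enumerate_cons, pvReassemble]
    · have hd : pvStepA (acc, idx) c = (acc ++ [c], idx) := by
        unfold pvStepA; simp [ha]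
      rw [List.foldl_cons, hd, ih (acc ++ [c]) idx hidx]
      simp [ha, pvReassemble]

-- ===== VERDICT (by name: the statement is the Claim_ definition above) =====
theorem decrypt_variable_caesar_spec : Claim_equal_decrypt_variable_caesar := by
  intro s _
  unfold Spec_decrypt_variable_caesar decrypt_variable_caesar decrypt_variable_caesar_alt
  rw [pvMain s.toList [] 0 le_rfl]
  rfl
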